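-- pv_equiv track=rewrite | github.com/Wisnusat/funding_rate | backend/app/services/scp.py | aggregate_funding_data
-- ===== SOURCE A (Python) =====
-- from collections import defaultdict
--
-- def aggregate_funding_data(unique_tickers, aevo_data, bybit_data, gateio_data, hyperliquid_data):
--     # Create a dictionary to hold the aggregated data
--     aggregated_data = defaultdict(lambda: {'aevo': None, 'bybit': None, 'gateio': None, 'hyperliquid': None})
--
--     # Helper function to insert data into the aggregated_data dictionary
--     def insert_data(source_name, data):
--         for ticker, funding in data:
--             if ticker in unique_tickers:
--                 # Directly assign the funding, convert to string if needed
--                 aggregated_data[ticker][source_name] = str(funding) if funding is not None else None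
--
--     # Insert data from each source
--     insert_data('aevo', aevo_data)
--     insert_data('bybit', bybit_data)
--     insert_data('gateio', gateio_data)
--     insert_data('hyperliquid', hyperliquid_data)
--
--     return dict(aggregated_data)
-- ===== SOURCE B (Python) =====
-- def aggregate_funding_data(unique_tickers, aevo_data, bybit_data, gateio_data, hyperliquid_data):
--     ticker_set = set(unique_tickers)
--     # one lookup dict per source: last occurrence wins, like repeated assignment in A
--     m_aevo = {t: f for t, f in aevo_data if t in ticker_set}
--     m_bybit = {t: f for t, f in bybit_data if t in ticker_set}
--     m_gateio = {t: f for t, f in gateio_data if t in ticker_set}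
--     m_hyper = {t: f for t, f in hyperliquid_data if t in ticker_set}
--     # output ticker order = first occurrence across the four sources (A's defaultdict insertion order)
--     order = dict.fromkeys(t for t, _ in aevo_data + bybit_data + gateio_data + hyperliquid_data if t in ticker_set)
--
--     def cell(m, t):
--         v = m.get(t)
--         return None if v is None else str(v)
--
--     return {t: {'aevo': cell(m_aevo, t), 'bybit': cell(m_bybit, t),
--                 'gateio': cell(m_gateio, t), 'hyperliquid': cell(m_hyper, t)}
--             for t in order}
-- ===== Notes on version B (the rewrite author's own statement) =====
-- stated objective: faster
-- what changed: Instead of mutating one nested defaultdict entry-by-entry with a list membership test per entry, B builds four per-source ticker->funding dicts (last occurrence wins) and an ordered-dedup ticker list using a set of unique_tickers, then assembles each output row by four dict lookups.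
import Mathlib
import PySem

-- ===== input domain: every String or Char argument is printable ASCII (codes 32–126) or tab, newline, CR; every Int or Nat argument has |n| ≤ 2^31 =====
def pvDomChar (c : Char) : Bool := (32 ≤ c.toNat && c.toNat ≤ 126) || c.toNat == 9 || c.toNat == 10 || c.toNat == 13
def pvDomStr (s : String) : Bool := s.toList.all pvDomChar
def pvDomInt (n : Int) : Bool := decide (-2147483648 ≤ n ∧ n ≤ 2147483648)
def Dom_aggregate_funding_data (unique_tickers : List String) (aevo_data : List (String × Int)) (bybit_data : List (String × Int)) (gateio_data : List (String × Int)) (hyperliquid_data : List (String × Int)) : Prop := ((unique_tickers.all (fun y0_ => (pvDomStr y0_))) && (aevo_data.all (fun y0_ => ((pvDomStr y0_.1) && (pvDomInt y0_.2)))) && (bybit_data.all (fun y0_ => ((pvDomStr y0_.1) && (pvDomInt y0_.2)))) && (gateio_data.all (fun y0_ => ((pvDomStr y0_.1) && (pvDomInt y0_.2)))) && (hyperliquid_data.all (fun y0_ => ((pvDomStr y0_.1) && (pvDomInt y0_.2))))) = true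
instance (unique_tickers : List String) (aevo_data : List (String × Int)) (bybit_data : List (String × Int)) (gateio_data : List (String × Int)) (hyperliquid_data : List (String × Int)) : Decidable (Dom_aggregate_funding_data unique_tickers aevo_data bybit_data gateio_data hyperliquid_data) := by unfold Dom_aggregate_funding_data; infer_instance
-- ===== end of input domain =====

-- B replaces A's mutated nested defaultdict by four per-source lookup dicts plus one
-- ordered-dedup pass over the concatenated sources (set membership instead of a list scan);
-- objective: faster (O(1) ticker-set lookups instead of scanning unique_tickers per entry).


-- ===== PORT A =====
-- the defaultdict's default row: {'aevo': None, 'bybit': None, 'gateio': None, 'hyperliquid': None}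
def pvDefaultRow : PySem.Dict String (Option String) :=
  PySem.Dict.ofList [("aevo", none), ("bybit", none), ("gateio", none), ("hyperliquid", none)]

-- insert_data(source_name, data): 'aggregated_data[ticker][source_name] = …' on a defaultdict
-- is Dict.modify with the default row.  'str(funding) if funding is not None else None':
-- funding is an int here (type convention), so the value written is always some (str funding).
def pvInsertData (unique_tickers : List String) (source_name : String)
    (data : List (String × Int))
    (agg : PySem.Dict String (PySem.Dict String (Option String))) :
    PySem.Dict String (PySem.Dict String (Option String)) :=
  data.foldl (fun agg p =>
    if p.1 ∈ unique_tickers then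
      agg.modify p.1 pvDefaultRow (fun row => row.insert source_name (some (PySem.Int.toStr p.2)))
    else agg) agg

def aggregate_funding_data (unique_tickers : List String) (aevo_data : List (String × Int)) (bybit_data : List (String × Int)) (gateio_data : List (String × Int)) (hyperliquid_data : List (String × Int)) : List (String × List (String × Option String)) :=
  (pvInsertData unique_tickers "hyperliquid" hyperliquid_data
    (pvInsertData unique_tickers "gateio" gateio_data
      (pvInsertData unique_tickers "bybit" bybit_data
        (pvInsertData unique_tickers "aevo" aevo_data
          PySem.Dict.empty)))).items.map (fun p => (p.1, p.2.items))

-- ===== PORT B =====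
-- {t: f for t, f in data if t in ticker_set}
def pvSrcMap (unique_tickers : List String) (data : List (String × Int)) : PySem.Dict String Int :=
  PySem.Dict.ofList (data.filter (fun p => decide (p.1 ∈ unique_tickers)))

-- cell(m, t): 'v = m.get(t); None if v is None else str(v)'
def pvCell (m : PySem.Dict String Int) (t : String) : Option String :=
  match m.get? t with
  | none => none
  | some v => some (PySem.Int.toStr v)

def aggregate_funding_data_alt (unique_tickers : List String) (aevo_data : List (String × Int)) (bybit_data : List (String × Int)) (gateio_data : List (String × Int)) (hyperliquid_data : List (String × Int)) : List (String × List (String × Option String)) :=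
  let mAevo := pvSrcMap unique_tickers aevo_data
  let mBybit := pvSrcMap unique_tickers bybit_data
  let mGateio := pvSrcMap unique_tickers gateio_data
  let mHyper := pvSrcMap unique_tickers hyperliquid_data
  -- order = dict.fromkeys(t for t, _ in aevo + bybit + gateio + hyper if t in ticker_set)
  let order := PySem.List.dedup
    (((aevo_data ++ bybit_data ++ gateio_data ++ hyperliquid_data).filter
        (fun p => decide (p.1 ∈ unique_tickers))).map (·.1))
  order.map (fun t =>
    (t, [("aevo", pvCell mAevo t), ("bybit", pvCell mBybit t),
         ("gateio", pvCell mGateio t), ("hyperliquid", pvCell mHyper t)]))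

-- ===== PRECONDITION & SPEC =====
def Spec_aggregate_funding_data (unique_tickers : List String) (aevo_data : List (String × Int)) (bybit_data : List (String × Int)) (gateio_data : List (String × Int)) (hyperliquid_data : List (String × Int)) (out : List (String × List (String × Option String))) : Prop := out = aggregate_funding_data_alt unique_tickers aevo_data bybit_data gateio_data hyperliquid_data
instance (unique_tickers : List String) (aevo_data : List (String × Int)) (bybit_data : List (String × Int)) (gateio_data : List (String × Int)) (hyperliquid_data : List (String × Int)) (out : List (String × List (String × Option String))) : Decidable (Spec_aggregate_funding_data unique_tickers aevo_data bybit_data gateio_data hyperliquid_data out) := by unfold Spec_aggregate_funding_data; infer_instance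

-- ===== CLAIM (what is proved, stated in full; the proofs are below) =====
def Claim_equal_aggregate_funding_data : Prop := ∀ (unique_tickers : List String) (aevo_data : List (String × Int)) (bybit_data : List (String × Int)) (gateio_data : List (String × Int)) (hyperliquid_data : List (String × Int)), Dom_aggregate_funding_data unique_tickers aevo_data bybit_data gateio_data hyperliquid_data → Spec_aggregate_funding_data unique_tickers aevo_data bybit_data gateio_data hyperliquid_data (aggregate_funding_data unique_tickers aevo_data bybit_data gateio_data hyperliquid_data)

-- ===== LEMMAS AND PROOFS =====

-- the effect of one insert_data pass on the row of a fixed ticker t, as a function of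
-- the last funding that source records for t (none = t absent from the filtered source)
def pvApply (d : PySem.Dict String (Option String)) (name : String) (o : Option Int) :
    PySem.Dict String (Option String) :=
  match o with
  | some f => d.insert name (some (PySem.Int.toStr f))
  | none => d

theorem pvOfList_append_singleton (l : List (String × Int)) (q : String × Int) :
    PySem.Dict.ofList (l ++ [q]) = (PySem.Dict.ofList l).insert q.1 q.2 := by
  simp [PySem.Dict.ofList, PySem.Dict.update, List.foldl_append]

-- the filtered form of insert_data
theorem pvInsertData_eq_filter (ut : List String) (name : String) (data : List (String × Int))
    (agg : PySem.Dict String (PySem.Dict String (Option String))) :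
    pvInsertData ut name data agg =
      (data.filter (fun p => decide (p.1 ∈ ut))).foldl
        (fun agg p => agg.modify p.1 pvDefaultRow
          (fun row => row.insert name (some (PySem.Int.toStr p.2)))) agg := by
  unfold pvInsertData
  exact PySem.List.foldl_ite_eq_foldl_filter _ _ _ _

-- getD of one (filtered) insert_data pass = pvApply with that source's last funding for t
theorem pvGetD_pass (name : String) (l : List (String × Int))
    (agg : PySem.Dict String (PySem.Dict String (Option String))) (t : String) :
    (l.foldl (fun agg p => agg.modify p.1 pvDefaultRow
        (fun row => row.insert name (some (PySem.Int.toStr p.2)))) agg).getD t pvDefaultRow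
      = pvApply (agg.getD t pvDefaultRow) name ((PySem.Dict.ofList l).get? t) := by
  induction l using List.reverseRecOn with
  | nil => simp [pvApply, PySem.Dict.ofList, PySem.Dict.update]
  | append_singleton l q ih =>
      rw [List.foldl_append, pvOfList_append_singleton]
      simp only [List.foldl_cons, List.foldl_nil, PySem.Dict.getD_modify,
        PySem.Dict.get?_insert]
      by_cases hq : t = q.1
      · subst hq
        rw [if_pos rfl, if_pos rfl, ih]
        cases hl : (PySem.Dict.ofList l).get? q.1 <;>
          simp [pvApply, PySem.Dict.insert_insert_self]
      · rw [if_neg hq, if_neg hq, ih]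

-- keys of one (filtered) insert_data pass
theorem pvKeys_pass (name : String) (l : List (String × Int))
    (agg : PySem.Dict String (PySem.Dict String (Option String))) :
    (l.foldl (fun agg p => agg.modify p.1 pvDefaultRow
        (fun row => row.insert name (some (PySem.Int.toStr p.2)))) agg).keys
      = PySem.Set.update agg.keys (l.map (·.1)) :=
  PySem.Dict.keys_foldl_modify_key l (·.1) pvDefaultRow
    (fun _ p => fun row => row.insert name (some (PySem.Int.toStr p.2))) agg

theorem pvNodup_pass (name : String) (l : List (String × Int))
    (agg : PySem.Dict String (PySem.Dict String (Option String)))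
    (h : agg.keys.Nodup) :
    (l.foldl (fun agg p => agg.modify p.1 pvDefaultRow
        (fun row => row.insert name (some (PySem.Int.toStr p.2)))) agg).keys.Nodup :=
  PySem.Dict.nodup_keys_foldl_modify_key l (·.1) pvDefaultRow
    (fun _ p => fun row => row.insert name (some (PySem.Int.toStr p.2))) agg h

-- the row assembled by the four passes, as an items list
theorem pvRow_items (oA oB oG oH : Option Int) :
    (pvApply (pvApply (pvApply (pvApply pvDefaultRow "aevo" oA) "bybit" oB)
        "gateio" oG) "hyperliquid" oH).items
      = [("aevo", oA.map PySem.Int.toStr), ("bybit", oB.map PySem.Int.toStr),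
         ("gateio", oG.map PySem.Int.toStr), ("hyperliquid", oH.map PySem.Int.toStr)] := by
  rcases oA with _ | fa <;> rcases oB with _ | fb <;>
    rcases oG with _ | fg <;> rcases oH with _ | fh <;> rfl

theorem pvCell_eq (m : PySem.Dict String Int) (t : String) :
    pvCell m t = (m.get? t).map PySem.Int.toStr := by
  cases h : m.get? t <;> simp [pvCell, h]

-- ===== VERDICT (by name: the statement is the Claim_ definition above) =====
theorem aggregate_funding_data_spec : Claim_equal_aggregate_funding_data := by
  intro ut a b g h _dom
  unfold Spec_aggregate_funding_data aggregate_funding_data aggregate_funding_data_alt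
  simp only [pvInsertData_eq_filter]
  set fA := a.filter (fun p => decide (p.1 ∈ ut)) with hfA
  set fB := b.filter (fun p => decide (p.1 ∈ ut)) with hfB
  set fG := g.filter (fun p => decide (p.1 ∈ ut)) with hfG
  set fH := h.filter (fun p => decide (p.1 ∈ ut)) with hfH
  set step := fun (name : String) (agg : PySem.Dict String (PySem.Dict String (Option String)))
      (p : String × Int) =>
    agg.modify p.1 pvDefaultRow (fun row => row.insert name (some (PySem.Int.toStr p.2))) with hstep
  set agg : PySem.Dict String (PySem.Dict String (Option String)) :=
    fH.foldl (step "hyperliquid")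
      (fG.foldl (step "gateio")
        (fB.foldl (step "bybit")
          (fA.foldl (step "aevo") PySem.Dict.empty))) with hagg
  have hnodup : agg.keys.Nodup := by
    rw [hagg, hstep]
    exact pvNodup_pass _ _ _ (pvNodup_pass _ _ _ (pvNodup_pass _ _ _
      (pvNodup_pass _ _ _ PySem.Dict.nodup_keys_empty)))
  have hkeys : agg.keys =
      PySem.List.dedup (((a ++ b ++ g ++ h).filter (fun p => decide (p.1 ∈ ut))).map (·.1)) := by
    rw [hagg, hstep]
    rw [pvKeys_pass, pvKeys_pass, pvKeys_pass, pvKeys_pass]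
    simp only [List.filter_append, List.map_append, ← hfA, ← hfB, ← hfG, ← hfH,
      PySem.List.dedup_eq_ofList, PySem.Set.ofList_append,
      PySem.Dict.keys_empty]
    rw [PySem.Set.update_nil_left]
  have hgetD : ∀ t, agg.getD t pvDefaultRow =
      pvApply (pvApply (pvApply (pvApply pvDefaultRow "aevo" ((pvSrcMap ut a).get? t))
        "bybit" ((pvSrcMap ut b).get? t)) "gateio" ((pvSrcMap ut g).get? t))
        "hyperliquid" ((pvSrcMap ut h).get? t) := by
    intro t
    rw [hagg, hstep]
    rw [pvGetD_pass, pvGetD_pass, pvGetD_pass, pvGetD_pass]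
    simp [pvSrcMap, PySem.Dict.getD_empty, ← hfA, ← hfB, ← hfG, ← hfH]
  rw [PySem.Dict.items_eq_map_keys agg hnodup pvDefaultRow, List.map_map, hkeys]
  apply List.map_congr_left
  intro t _
  simp only [Function.comp_apply, hgetD t, pvRow_items, pvCell_eq]
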